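-- pv_equiv track=rewrite | github.com/nuncaeslupus/research-buddy | src/research_docs/build.py | _nowrap_cols
-- ===== SOURCE A (Python) =====
-- MAX_NOWRAP_COLUMN_LENGTH = 30
--
-- def _nowrap_cols(headers: list[str], rows: list[list[str]]) -> list[bool]:
--     ncols = len(headers) or (len(rows[0]) if rows else 0)
--     if ncols == 0:
--         return []
--     maxes = [0] * ncols
--     for row in rows:
--         for i, cell in enumerate(row[:ncols]):
--             maxes[i] = max(maxes[i], len(cell))
--     return [mx < MAX_NOWRAP_COLUMN_LENGTH for mx in maxes]
-- ===== SOURCE B (Python) =====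
-- MAX_NOWRAP_COLUMN_LENGTH = 30
--
--
-- def _nowrap_cols(headers: list[str], rows: list[list[str]]) -> list[bool]:
--     ncols = len(headers) or (len(rows[0]) if rows else 0)
--     if ncols == 0:
--         return []
--     # Columns no row reaches trivially stay within the limit.
--     width = min(ncols, max(map(len, rows), default=0))
--     nowrap = [
--         max((len(row[i]) for row in rows if i < len(row)), default=0)
--         < MAX_NOWRAP_COLUMN_LENGTH
--         for i in range(width)
--     ]
--     nowrap.extend([True] * (ncols - width))
--     return nowrap
-- ===== Notes on version B (the rewrite author's own statement) =====
-- stated objective: idiomatic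
-- what changed: Replaces the row-major double loop mutating a running-max array with a column-major comprehension reducing each column via max(..., default=0), scanning only columns up to the longest row and filling the rest with True.
import Mathlib
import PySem

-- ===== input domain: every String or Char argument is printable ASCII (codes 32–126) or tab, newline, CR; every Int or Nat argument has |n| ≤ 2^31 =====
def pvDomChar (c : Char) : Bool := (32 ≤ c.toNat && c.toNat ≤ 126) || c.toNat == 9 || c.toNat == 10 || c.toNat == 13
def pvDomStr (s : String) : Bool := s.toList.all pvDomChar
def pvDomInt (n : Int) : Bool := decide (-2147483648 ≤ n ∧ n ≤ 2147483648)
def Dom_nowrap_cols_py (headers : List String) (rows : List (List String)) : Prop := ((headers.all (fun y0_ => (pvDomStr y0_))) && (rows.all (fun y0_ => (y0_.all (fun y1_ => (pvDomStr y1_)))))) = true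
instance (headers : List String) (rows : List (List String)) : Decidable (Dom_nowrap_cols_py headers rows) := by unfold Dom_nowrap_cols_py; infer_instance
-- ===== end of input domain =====

-- B re-derives each column's verdict by a column-major reduction (max over the column, default 0)
-- instead of A's row-major double loop mutating a running-max array; same cost, more idiomatic.

-- ===== PORT A =====
-- port of the row-major loop: maxes[i] = max(maxes[i], len(cell)) over enumerate(row[:ncols])
def nowrap_cols_py (headers : List String) (rows : List (List String)) : List Bool :=
  let ncols : Nat :=
    if headers.length ≠ 0 then headers.length
    else (if rows ≠ [] then rows.head!.length else 0)
  if ncols = 0 then []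
  else
    let maxes : List Nat := List.replicate ncols 0
    let maxes := rows.foldl (fun maxes row =>
      (PySem.List.enumerate (PySem.List.slice row none (some (ncols : Int))) 0).foldl
        (fun m ic =>
          PySem.List.pySetD m ic.1 (max (PySem.List.pyGetD m ic.1 0) ic.2.length)) maxes)
      maxes
    maxes.map (fun mx => decide (mx < 30))

-- ===== PORT B =====
-- port of B: per column i, fold max(len(row[i])) over rows with default 0, then compare
def nowrap_cols_py_alt (headers : List String) (rows : List (List String)) : List Bool :=
  let ncols : Nat :=
    if headers.length ≠ 0 then headers.length
    else (if rows ≠ [] then rows.head!.length else 0)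
  if ncols = 0 then []
  else
    -- width = min(ncols, max(map(len, rows), default=0)); the max-with-default is ported as a fold
    let width := min ncols (rows.foldl (fun m row => max m row.length) 0)
    ((List.range width).map (fun (i : Nat) =>
      decide ((rows.foldl (fun m row =>
        if i < row.length then max m (PySem.List.pyGetD row ((i : Nat) : Int) "").length else m) 0) < 30)))
      ++ List.replicate (ncols - width) true

-- ===== PRECONDITION & SPEC =====
def Spec_nowrap_cols_py (headers : List String) (rows : List (List String)) (out : List Bool) : Prop := out = nowrap_cols_py_alt headers rows
instance (headers : List String) (rows : List (List String)) (out : List Bool) : Decidable (Spec_nowrap_cols_py headers rows out) := by unfold Spec_nowrap_cols_py; infer_instance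

-- ===== CLAIM (what is proved, stated in full; the proofs are below) =====
def Claim_equal_nowrap_cols_py : Prop := ∀ (headers : List String) (rows : List (List String)), Dom_nowrap_cols_py headers rows → Spec_nowrap_cols_py headers rows (nowrap_cols_py headers rows)

-- ===== LEMMAS AND PROOFS =====

-- A's inner loop over one row
def pvRowStep (ncols : Nat) (m : List Nat) (row : List String) : List Nat :=
  (PySem.List.enumerate (PySem.List.slice row none (some (ncols : Int))) 0).foldl
    (fun m ic => PySem.List.pySetD m ic.1 (max (PySem.List.pyGetD m ic.1 0) ic.2.length)) m

-- B's per-column step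
def pvColStep (i : Nat) (m : Nat) (row : List String) : Nat :=
  if i < row.length then max m (PySem.List.pyGetD row (i : Int) "").length else m

theorem pvInner_len (l : List String) (s : Nat) (m : List Nat)
    (h : s + l.length ≤ m.length) :
    ((PySem.List.enumerate l (s : Int)).foldl
      (fun m ic => PySem.List.pySetD m ic.1 (max (PySem.List.pyGetD m ic.1 0) ic.2.length)) m).length
      = m.length := by
  induction l generalizing s m with
  | nil => simp [PySem.List.enumerate_nil]
  | cons c l ih =>
    rw [PySem.List.enumerate_cons]
    simp only [List.foldl_cons]
    rw [show ((s : Int) + 1) = ((s + 1 : Nat) : Int) by push_cast; ring]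
    have h' : s + 1 + l.length ≤ m.length := by
      simp only [List.length_cons] at h; omega
    rw [ih (s + 1) _ (by simpa [PySem.List.pySetD_natCast] using h')]
    simp [PySem.List.pySetD_natCast]

theorem pvInner_getD (l : List String) (s : Nat) (m : List Nat) (i : Nat)
    (h : s + l.length ≤ m.length) :
    (((PySem.List.enumerate l (s : Int)).foldl
      (fun m ic => PySem.List.pySetD m ic.1 (max (PySem.List.pyGetD m ic.1 0) ic.2.length)) m).getD i 0)
      = if s ≤ i ∧ i < s + l.length then max (m.getD i 0) ((l.getD (i - s) "").length)
        else m.getD i 0 := by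
  induction l generalizing s m with
  | nil =>
    simp only [PySem.List.enumerate_nil, List.foldl_nil, List.length_nil]
    rw [if_neg (by omega)]
  | cons c l ih =>
    rw [PySem.List.enumerate_cons]
    simp only [List.foldl_cons]
    rw [show ((s : Int) + 1) = ((s + 1 : Nat) : Int) by push_cast; ring]
    have hs : s < m.length := by simp only [List.length_cons] at h; omega
    have h' : s + 1 + l.length ≤ m.length := by
      simp only [List.length_cons] at h; omega
    simp only [PySem.List.pySetD_natCast, PySem.List.pyGetD_natCast]
    rw [ih (s + 1) _ (by simpa using h')]
    have hset : ∀ j, ((m.set s (max (m.getD s 0) c.length)).getD j 0)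
        = if s = j then max (m.getD s 0) c.length else m.getD j 0 := by
      intro j
      by_cases hj : s = j
      · subst hj
        simp [List.getD_eq_getElem?_getD, hs]
      · simp [List.getD_eq_getElem?_getD, hj]
    by_cases hi : i = s
    · subst hi
      rw [if_neg (show ¬(i + 1 ≤ i ∧ i < i + 1 + l.length) from by omega),
        if_pos (show i ≤ i ∧ i < i + (c :: l).length from by simp only [List.length_cons]; omega)]
      rw [hset i, if_pos rfl]
      simp
    · have hmi : (m.set s (max (m.getD s 0) c.length)).getD i 0 = m.getD i 0 := by
        rw [hset i, if_neg (show ¬ s = i from fun e => hi e.symm)]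
      rw [hmi]
      by_cases hrange : s + 1 ≤ i ∧ i < s + 1 + l.length
      · rw [if_pos hrange,
          if_pos (show s ≤ i ∧ i < s + (c :: l).length from by
            simp only [List.length_cons]; omega)]
        rw [show i - s = (i - (s + 1)) + 1 from by omega, List.getD_cons_succ]
      · rw [if_neg hrange,
          if_neg (show ¬(s ≤ i ∧ i < s + (c :: l).length) from by
            simp only [List.length_cons]; omega)]

theorem pvRowStep_len (ncols : Nat) (m : List Nat) (row : List String)
    (h : m.length = ncols) : (pvRowStep ncols m row).length = ncols := by
  unfold pvRowStep
  rw [show ((0 : Int)) = ((0 : Nat) : Int) from rfl, pvInner_len]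
  · exact h
  · rw [PySem.List.slice_to_natCast]
    simp only [Nat.zero_add, List.length_take, h]
    omega

theorem pvRowStep_getD (ncols : Nat) (m : List Nat) (row : List String) (i : Nat)
    (h : m.length = ncols) (hi : i < ncols) :
    (pvRowStep ncols m row).getD i 0 = pvColStep i (m.getD i 0) row := by
  unfold pvRowStep pvColStep
  rw [show ((0 : Int)) = ((0 : Nat) : Int) from rfl, pvInner_getD]
  · rw [PySem.List.slice_to_natCast]
    simp only [Nat.zero_add, Nat.zero_le, true_and, List.length_take, Nat.sub_zero,
      PySem.List.pyGetD_natCast]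
    by_cases hlt : i < row.length
    · rw [if_pos (by omega), if_pos hlt]
      congr 1
      simp [List.getD_eq_getElem?_getD, hi]
    · rw [if_neg (by omega), if_neg hlt]
  · rw [PySem.List.slice_to_natCast]
    simp only [Nat.zero_add, List.length_take, h]
    omega

theorem pvFold_cols (rows : List (List String)) (ncols : Nat) (m : List Nat)
    (h : m.length = ncols) :
    rows.foldl (pvRowStep ncols) m
      = (List.range ncols).map (fun i => rows.foldl (pvColStep i) (m.getD i 0)) := by
  induction rows generalizing m with
  | nil =>
    apply List.ext_getElem
    · simp [h]
    · intro i h1 h2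
      simp only [List.getElem_map, List.getElem_range, List.foldl_nil]
      rw [List.getD_eq_getElem?_getD, List.getElem?_eq_getElem (by simpa using h1)]
      rfl
  | cons row rows ih =>
    simp only [List.foldl_cons]
    rw [ih _ (pvRowStep_len ncols m row h)]
    apply List.map_congr_left
    intro i hi
    simp only [List.mem_range] at hi
    rw [pvRowStep_getD ncols m row i h hi]

theorem pvMaxLen_init_le (rows : List (List String)) (m : Nat) :
    m ≤ rows.foldl (fun a r => max a r.length) m := by
  induction rows generalizing m with
  | nil => exact le_refl m
  | cons r rs ih =>
    exact le_trans (le_max_left m r.length) (ih _)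

theorem pvMaxLen_ge (rows : List (List String)) (m : Nat) (row : List String)
    (h : row ∈ rows) : row.length ≤ rows.foldl (fun a r => max a r.length) m := by
  induction rows generalizing m with
  | nil => cases h
  | cons r rs ih =>
    rcases List.mem_cons.mp h with h | h
    · subst h
      exact le_trans (le_max_right m row.length) (pvMaxLen_init_le rs _)
    · exact ih _ h

theorem pvColFold_id (i : Nat) (rows : List (List String)) (m : Nat)
    (h : ∀ row ∈ rows, row.length ≤ i) : rows.foldl (pvColStep i) m = m := by
  induction rows generalizing m with
  | nil => rfl
  | cons r rs ih =>
    simp only [List.foldl_cons]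
    rw [show pvColStep i m r = m from by
      unfold pvColStep
      rw [if_neg (by have := h r (List.mem_cons_self); omega)]]
    exact ih m (fun row hr => h row (List.mem_cons_of_mem _ hr))

-- ===== VERDICT (by name: the statement is the Claim_ definition above) =====
theorem nowrap_cols_py_spec : Claim_equal_nowrap_cols_py := by
  intro headers rows _
  unfold Spec_nowrap_cols_py
  simp only [nowrap_cols_py, nowrap_cols_py_alt]
  generalize (if headers.length ≠ 0 then headers.length
    else (if rows ≠ [] then rows.head!.length else 0)) = ncols
  by_cases h0 : ncols = 0
  · rw [if_pos h0, if_pos h0]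
  · rw [if_neg h0, if_neg h0]
    have hfold : rows.foldl (fun maxes row =>
        (PySem.List.enumerate (PySem.List.slice row none (some (ncols : Int))) 0).foldl
          (fun m ic => PySem.List.pySetD m ic.1 (max (PySem.List.pyGetD m ic.1 0) ic.2.length)) maxes)
        (List.replicate ncols 0)
        = rows.foldl (pvRowStep ncols) (List.replicate ncols 0) := rfl
    rw [hfold, pvFold_cols rows ncols _ (by simp)]
    rw [List.map_map]
    have h1 : (List.range ncols).map ((fun mx => decide (mx < 30)) ∘
          (fun i => rows.foldl (pvColStep i) ((List.replicate ncols 0).getD i 0)))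
        = (List.range ncols).map (fun i => decide (rows.foldl (pvColStep i) 0 < 30)) := by
      apply List.map_congr_left
      intro i hi
      simp only [Function.comp]
      simp only [show (List.replicate ncols (0 : Nat)).getD i 0 = 0 from by
        simp [List.getD_eq_getElem?_getD, List.getElem?_replicate]; split <;> rfl]
    rw [h1]
    have hwle : min ncols (rows.foldl (fun m row => max m row.length) 0) ≤ ncols :=
      min_le_left _ _
    have hrow : ∀ row ∈ rows,
        row.length ≤ min ncols (rows.foldl (fun m row => max m row.length) 0)
          ∨ min ncols (rows.foldl (fun m row => max m row.length) 0) = ncols := by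
      intro row hr
      rcases le_total ncols (rows.foldl (fun m row => max m row.length) 0) with hc | hc
      · right; omega
      · left
        have := pvMaxLen_ge rows 0 row hr
        omega
    generalize hw : min ncols (rows.foldl (fun m row => max m row.length) 0) = width at hwle hrow
    have hsplit : (List.range ncols).map (fun i => decide (rows.foldl (pvColStep i) 0 < 30))
        = (List.range width).map (fun i => decide (rows.foldl (pvColStep i) 0 < 30))
          ++ List.replicate (ncols - width) true := by
      conv_lhs => rw [show ncols = width + (ncols - width) from by omega]
      rw [List.range_add, List.map_append]
      congr 1
      rw [List.map_map]
      have hconst : ∀ j ∈ List.range (ncols - width),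
          ((fun i => decide (rows.foldl (pvColStep i) 0 < 30)) ∘ (fun j => width + j)) j = true := by
        intro j hj
        simp only [List.mem_range] at hj
        simp only [Function.comp]
        rw [pvColFold_id (width + j) rows 0 (by
          intro row hr
          rcases hrow row hr with h | h
          · omega
          · omega)]
        rfl
      rw [List.map_congr_left hconst]
      simp
    rw [hsplit]
    rfl
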